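-- pv_equiv track=rewrite | github.com/k4west/Algorithm | 백준/Silver/1904. 01타일/01타일.py | f
-- ===== SOURCE A (Python) =====
-- def f(n,p):
--     a, b = 1,1
--     for _ in range(n//2-1):
--         a, b = b, (a+b)%p
--     if n % 2:
--         return (pow(b,2)+pow(a,2)) % p
--     else:
--         return (pow(b,2)-pow(b-a,2)) % p
-- ===== SOURCE B (Python) =====
-- def f(n, p):
--     # Fast-doubling Fibonacci mod p: returns fib(n) % p in O(log n).
--     def fib2(k):  # (fib(k) % p, fib(k+1) % p)
--         if k == 0:
--             return (0, 1)
--         a, b = fib2(k // 2)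
--         c = (a * (2 * b - a)) % p
--         d = (a * a + b * b) % p
--         if k % 2 == 0:
--             return (c, d)
--         else:
--             return (d, (c + d) % p)
--     return fib2(n)[0]
-- ===== Notes on version B (the rewrite author's own statement) =====
-- stated objective: faster
-- what changed: Replaced A's O(n) linear Fibonacci iteration (plus parity-based squaring at the end) by a recursive fast-doubling computation of fib(n) mod p.
-- intended difference: For n in {0,1} (with p not in {1,-1}) A's loop runs zero times and it returns its leftover seed values (1%p at n=0, 2%p at n=1) instead of Fibonacci; B returns fib(n)%p (0 and 1%p), the values consistent with f(n)=fib(n) mod p which A computes for every n>=2. — e.g. on f(1, 100): A returns 2, B returns 1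
-- outside the precondition, e.g. on f(-5, 100): A returns 2, B raises RecursionError
import Mathlib
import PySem

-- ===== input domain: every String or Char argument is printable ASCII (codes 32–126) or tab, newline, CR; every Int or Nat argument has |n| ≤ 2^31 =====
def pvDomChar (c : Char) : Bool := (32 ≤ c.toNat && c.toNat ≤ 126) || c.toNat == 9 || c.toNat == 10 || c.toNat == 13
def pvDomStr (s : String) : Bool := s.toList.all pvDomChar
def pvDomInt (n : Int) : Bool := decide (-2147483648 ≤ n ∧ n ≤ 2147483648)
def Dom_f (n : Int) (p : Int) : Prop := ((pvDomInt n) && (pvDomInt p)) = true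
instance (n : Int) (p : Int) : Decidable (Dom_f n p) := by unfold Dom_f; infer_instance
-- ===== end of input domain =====

-- B replaces A's O(n) Fibonacci loop by recursive fast doubling (O(log n)); D_f records
-- A's leftover-seed return values at n ∈ {0,1}, where B returns fib(n) % p instead.

-- ===== PORT A =====
def f (n : Int) (p : Int) : Int :=
  let ab := (PySem.List.pyRange 0 (PySem.Int.floordiv n 2 - 1) 1).foldl
    (fun (ab : Int × Int) _ => (ab.2, PySem.Int.mod (ab.1 + ab.2) p)) (1, 1)
  if PySem.Int.mod n 2 ≠ 0 then
    PySem.Int.mod (ab.2 ^ 2 + ab.1 ^ 2) p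
  else
    PySem.Int.mod (ab.2 ^ 2 - (ab.2 - ab.1) ^ 2) p

-- ===== PORT B =====
-- helper fib2 of Source B. Python's `if k == 0` is widened to `k ≤ 0`, and a structural fuel
-- counter (n.toNat + 1 always suffices: k strictly decreases under k // 2 for k ≥ 1) makes
-- the recursion total: Python's fib2 never returns for k < 0, and Pre_f excludes n < 0.
def fAltFib2 (p : Int) : Nat → Int → Int × Int
  | 0, _ => (0, 1)
  | fuel + 1, k =>
    if k ≤ 0 then (0, 1)
    else
      let ab := fAltFib2 p fuel (PySem.Int.floordiv k 2)
      let c := PySem.Int.mod (ab.1 * (2 * ab.2 - ab.1)) p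
      let d := PySem.Int.mod (ab.1 * ab.1 + ab.2 * ab.2) p
      if PySem.Int.mod k 2 = 0 then (c, d) else (d, PySem.Int.mod (c + d) p)

def f_alt (n : Int) (p : Int) : Int := (fAltFib2 p (n.toNat + 1) n).1

-- ===== PRECONDITION & SPEC =====
-- Pre_f restricts to the function's natural domain n ≥ 0 (a tiling length): on n < 0 A
-- returns its untouched seed values while B's recursion never returns (RecursionError);
-- p = 0 is excluded because A raises ZeroDivisionError there.
def Pre_f (n : Int) (p : Int) : Prop := 0 ≤ n ∧ p ≠ 0
instance (n : Int) (p : Int) : Decidable (Pre_f n p) := by unfold Pre_f; infer_instance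
def pvWitness_f : Int × Int := (10, 15746)

-- For n in {0,1} (with p ∉ {1,-1}) A's loop runs zero times and it returns its leftover
-- seed values (1 % p at n = 0, 2 % p at n = 1) instead of Fibonacci; B returns fib(n) % p
-- (0 and 1 % p), the values consistent with f(n) = fib(n) mod p, which A computes for all n ≥ 2.
def D_f (n : Int) (p : Int) : Prop := n < 2 ∧ p ≠ 1 ∧ p ≠ -1
instance (n : Int) (p : Int) : Decidable (D_f n p) := by unfold D_f; infer_instance

def Spec_f (n : Int) (p : Int) (out : Int) : Prop := ¬ D_f n p → out = f_alt n p
instance (n : Int) (p : Int) (out : Int) : Decidable (Spec_f n p out) := by unfold Spec_f; infer_instance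

def pvDiffWitness_f : Int × Int := (1, 100)
def pvDiffWitnessOut_f : Int × Int := (2, 1)

-- ===== CLAIM (what is proved, stated in full; the proofs are below) =====
def Claim_unchanged_f : Prop := ∀ (n : Int) (p : Int), Dom_f n p → Pre_f n p → Spec_f n p (f n p)
def Claim_changed_f : Prop := Dom_f (pvDiffWitness_f.1) (pvDiffWitness_f.2) ∧ Pre_f (pvDiffWitness_f.1) (pvDiffWitness_f.2) ∧ D_f (pvDiffWitness_f.1) (pvDiffWitness_f.2) ∧ f (pvDiffWitness_f.1) (pvDiffWitness_f.2) = pvDiffWitnessOut_f.1 ∧ f_alt (pvDiffWitness_f.1) (pvDiffWitness_f.2) = pvDiffWitnessOut_f.2 ∧ pvDiffWitnessOut_f.1 ≠ pvDiffWitnessOut_f.2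
def Claim_exact_f : Prop := ∀ (n : Int) (p : Int), Dom_f n p → Pre_f n p → D_f n p → f n p ≠ f_alt n p

-- ===== LEMMAS AND PROOFS =====

-- Python `%` is congruent to its argument modulo p.
theorem pymod_modEq (z p : Int) : PySem.Int.mod z p ≡ z [ZMOD p] := by
  have h := PySem.Int.floordiv_mul_add_mod z p
  exact (Int.modEq_iff_dvd).mpr ⟨PySem.Int.floordiv z p, by linarith⟩

-- Congruent ints have equal Python `% p` values (p ≠ 0).
theorem pymod_congr {p x y : Int} (hp : p ≠ 0) (h : x ≡ y [ZMOD p]) :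
    PySem.Int.mod x p = PySem.Int.mod y p := by
  have hd : p ∣ PySem.Int.mod y p - PySem.Int.mod x p :=
    Int.ModEq.dvd (((pymod_modEq x p).trans h).trans (pymod_modEq y p).symm)
  have hz : PySem.Int.mod y p - PySem.Int.mod x p = 0 := by
    refine Int.eq_zero_of_abs_lt_dvd ((abs_dvd _ _).mpr hd) ?_
    rcases lt_or_gt_of_ne hp with hneg | hpos
    · have b1 := PySem.Int.mod_neg_bounds x hneg
      have b2 := PySem.Int.mod_neg_bounds y hneg
      rw [abs_of_neg hneg, abs_lt]; omega
    · have b1 := PySem.Int.mod_nonneg x hpos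
      have b2 := PySem.Int.mod_nonneg y hpos
      have c1 := PySem.Int.mod_lt x hpos
      have c2 := PySem.Int.mod_lt y hpos
      rw [abs_of_pos hpos, abs_lt]; omega
  omega

theorem fibInt_add_two (m : Nat) :
    (Nat.fib (m + 2) : Int) = (Nat.fib m : Int) + (Nat.fib (m + 1) : Int) := by
  push_cast [Nat.fib_add_two]; ring

theorem fibInt_two_mul (K : Nat) :
    (Nat.fib (2 * K) : Int) =
      (Nat.fib (K + 1) : Int) ^ 2 - ((Nat.fib (K + 1) : Int) - (Nat.fib K : Int)) ^ 2 := by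
  have hle : Nat.fib K ≤ 2 * Nat.fib (K + 1) := by
    have := Nat.fib_le_fib_succ (n := K); omega
  rw [Nat.fib_two_mul]
  push_cast [hle]
  ring

theorem fibInt_two_mul_add_one (K : Nat) :
    (Nat.fib (2 * K + 1) : Int) = (Nat.fib (K + 1) : Int) ^ 2 + (Nat.fib K : Int) ^ 2 := by
  rw [Nat.fib_two_mul_add_one]; push_cast; ring

-- A's loop with its element-independent body is function iteration.
theorem loopA (p : Int) : ∀ (l : List Int) (init : Int × Int),
    l.foldl (fun (ab : Int × Int) _ => (ab.2, PySem.Int.mod (ab.1 + ab.2) p)) init =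
      (fun ab : Int × Int => (ab.2, PySem.Int.mod (ab.1 + ab.2) p))^[l.length] init := by
  intro l
  induction l with
  | nil => intro init; rfl
  | cons x t ih =>
      intro init
      simp only [List.foldl_cons, List.length_cons, ih, Function.iterate_succ_apply]

-- Loop invariant of A: after j iterations from (1,1) the pair is ≡ (fib(j+1), fib(j+2)) mod p.
theorem iterA_fib (p : Int) (j : Nat) :
    ((fun ab : Int × Int => (ab.2, PySem.Int.mod (ab.1 + ab.2) p))^[j] (1, 1)).1
        ≡ (Nat.fib (j + 1) : Int) [ZMOD p] ∧
    ((fun ab : Int × Int => (ab.2, PySem.Int.mod (ab.1 + ab.2) p))^[j] (1, 1)).2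
        ≡ (Nat.fib (j + 2) : Int) [ZMOD p] := by
  induction j with
  | zero => simp [Int.ModEq.refl]
  | succ j ih =>
      rw [Function.iterate_succ_apply']
      refine ⟨ih.2, ?_⟩
      have h := (pymod_modEq (((fun ab : Int × Int => (ab.2, PySem.Int.mod (ab.1 + ab.2) p))^[j] (1, 1)).1 + ((fun ab : Int × Int => (ab.2, PySem.Int.mod (ab.1 + ab.2) p))^[j] (1, 1)).2) p).trans (ih.1.add ih.2)
      have : ((Nat.fib (j + 1) : Int) + (Nat.fib (j + 2) : Int)) = (Nat.fib (j + 1 + 2) : Int) := by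
        rw [fibInt_add_two (j + 1)]
      rw [this] at h
      exact h

-- Characterisation of A: for n ≥ 2, f n p = fib(n) % p.
theorem fA_fib (n p : Int) (hn : 2 ≤ n) (hp : p ≠ 0) :
    f n p = PySem.Int.mod ((Nat.fib n.toNat : Int)) p := by
  have hfd : PySem.Int.floordiv n 2 = n / 2 := PySem.Int.floordiv_eq_ediv_of_pos (by omega)
  have hmd : PySem.Int.mod n 2 = n % 2 := PySem.Int.mod_eq_emod_of_pos (by omega)
  set K : Nat := (n / 2).toNat with hK
  have hK1 : 1 ≤ K := by omega
  have hlen : ((PySem.List.pyRange 0 (PySem.Int.floordiv n 2 - 1) 1)).length = K - 1 := by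
    rw [PySem.List.length_pyRange_one, hfd]; omega
  have ha := iterA_fib p (K - 1)
  rw [show K - 1 + 1 = K from by omega, show K - 1 + 2 = K + 1 from by omega] at ha
  unfold f
  rw [loopA, hlen]
  by_cases hpar : n % 2 = 0
  · have h2K : n.toNat = 2 * K := by omega
    rw [if_neg (by omega)]
    refine pymod_congr hp ?_
    have := ((ha.2.pow 2).sub ((ha.2.sub ha.1).pow 2))
    rw [h2K, fibInt_two_mul]
    exact this
  · have hpar1 : n % 2 = 1 := by omega
    have h2K : n.toNat = 2 * K + 1 := by omega
    rw [if_pos (by omega)]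
    refine pymod_congr hp ?_
    have := ((ha.2.pow 2).add (ha.1.pow 2))
    rw [h2K, fibInt_two_mul_add_one]
    exact this

-- Characterisation of B's helper: with enough fuel, fib2 k = (fib k % p, fib (k+1) % p) for k ≥ 1.
theorem fB_fib (p : Int) (hp : p ≠ 0) : ∀ (fuel K : Nat), 1 ≤ K → K ≤ fuel →
    fAltFib2 p fuel (K : Int) =
      (PySem.Int.mod (Nat.fib K : Int) p, PySem.Int.mod (Nat.fib (K + 1) : Int) p) := by
  intro fuel
  induction fuel with
  | zero => intro K h1 h2; omega
  | succ fuel ih =>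
      intro K h1 _h2
      have hkpos : ¬ ((K : Int) ≤ 0) := by omega
      have hfd : PySem.Int.floordiv (K : Int) 2 = ((K / 2 : Nat) : Int) := by
        exact_mod_cast PySem.Int.floordiv_natCast K 2
      have hmd : PySem.Int.mod (K : Int) 2 = ((K % 2 : Nat) : Int) := by
        exact_mod_cast PySem.Int.mod_natCast K 2
      rw [fAltFib2, if_neg hkpos, hfd, hmd]
      by_cases hone : K = 1
      · subst hone
        have h0 : fAltFib2 p fuel ((1 / 2 : Nat) : Int) = (0, 1) := by
          cases fuel <;> simp [fAltFib2]
        rw [h0]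
        have hc : PySem.Int.mod ((0 : Int) * (2 * 1 - 0)) p = PySem.Int.mod 0 p := by norm_num
        have hd : PySem.Int.mod ((0 : Int) * 0 + 1 * 1) p = PySem.Int.mod 1 p := by norm_num
        simp only
        rw [if_neg (by norm_num)]
        refine Prod.ext ?_ ?_
        · simp only; norm_num
        · simp only
          refine pymod_congr hp ?_
          have hc0 : PySem.Int.mod ((0 : Int) * (2 * 1 - 0)) p ≡ 0 [ZMOD p] := by
            have := pymod_modEq ((0 : Int) * (2 * 1 - 0)) p; simpa using this
          have hd1 : PySem.Int.mod ((0 : Int) * 0 + 1 * 1) p ≡ 1 [ZMOD p] := by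
            have := pymod_modEq ((0 : Int) * 0 + 1 * 1) p; simpa using this
          have := hc0.add hd1
          simpa using this
      · set j : Nat := K / 2 with hj
        have hj1 : 1 ≤ j := by omega
        have hjf : j ≤ fuel := by omega
        rw [ih j hj1 hjf]
        set a : Int := PySem.Int.mod (Nat.fib j : Int) p with hadef
        set b : Int := PySem.Int.mod (Nat.fib (j + 1) : Int) p with hbdef
        have hca : a ≡ (Nat.fib j : Int) [ZMOD p] := pymod_modEq _ p
        have hcb : b ≡ (Nat.fib (j + 1) : Int) [ZMOD p] := pymod_modEq _ p
        have hc : PySem.Int.mod (a * (2 * b - a)) p = PySem.Int.mod (Nat.fib (2 * j) : Int) p := by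
          refine pymod_congr hp ?_
          have h1 := hca.mul (((Int.ModEq.refl 2).mul hcb).sub hca)
          have h2 : (Nat.fib j : Int) * (2 * (Nat.fib (j + 1) : Int) - (Nat.fib j : Int)) =
              (Nat.fib (j + 1) : Int) ^ 2 - ((Nat.fib (j + 1) : Int) - (Nat.fib j : Int)) ^ 2 := by ring
          rw [fibInt_two_mul, ← h2]
          exact h1
        have hdd : PySem.Int.mod (a * a + b * b) p = PySem.Int.mod (Nat.fib (2 * j + 1) : Int) p := by
          refine pymod_congr hp ?_
          have h1 := (hca.mul hca).add (hcb.mul hcb)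
          have h2 : (Nat.fib j : Int) * (Nat.fib j : Int) + (Nat.fib (j + 1) : Int) * (Nat.fib (j + 1) : Int) =
              (Nat.fib (j + 1) : Int) ^ 2 + (Nat.fib j : Int) ^ 2 := by ring
          rw [fibInt_two_mul_add_one, ← h2]
          exact h1
        simp only
        rw [hc, hdd]
        by_cases hpar : K % 2 = 0
        · rw [if_pos (by exact_mod_cast congrArg (Nat.cast : Nat → Int) hpar)]
          have hKj : K = 2 * j := by omega
          rw [hKj]
        · rw [if_neg (by
            intro hcon
            have : (K % 2 : Nat) = 0 := by exact_mod_cast hcon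
            omega)]
          have hKj : K = 2 * j + 1 := by omega
          refine Prod.ext ?_ ?_
          · simp only; rw [hKj]
          · simp only
            rw [hKj]
            refine pymod_congr hp ?_
            have h1 := (pymod_modEq (Nat.fib (2 * j) : Int) p).add (pymod_modEq (Nat.fib (2 * j + 1) : Int) p)
            have h2 : ((Nat.fib (2 * j) : Int)) + (Nat.fib (2 * j + 1) : Int) = (Nat.fib (2 * j + 1 + 1) : Int) := by
              have := fibInt_add_two (2 * j); rw [show 2 * j + 2 = 2 * j + 1 + 1 from by omega] at this
              omega
            rw [← h2]
            exact h1

-- B on the main domain: for n ≥ 1, f_alt n p = fib(n) % p.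
theorem fB_main (n p : Int) (hn : 1 ≤ n) (hp : p ≠ 0) :
    f_alt n p = PySem.Int.mod ((Nat.fib n.toNat : Int)) p := by
  unfold f_alt
  have hcast : ((n.toNat : Nat) : Int) = n := by omega
  have := fB_fib p hp (n.toNat + 1) n.toNat (by omega) (by omega)
  rw [hcast] at this
  rw [this]

-- ===== VERDICT (by name: the statement is the Claim_ definition above) =====
theorem f_spec : Claim_unchanged_f := by
  intro n p _hdom hpre hnd
  rcases hpre with ⟨hn0, hp⟩
  by_cases h2 : 2 ≤ n
  · rw [fA_fib n p h2 hp, fB_main n p (by omega) hp]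
  · have hn2 : n < 2 := by omega
    have hp1 : p = 1 ∨ p = -1 := by
      by_contra hcon
      exact hnd ⟨hn2, fun h => hcon (Or.inl h), fun h => hcon (Or.inr h)⟩
    interval_cases n <;> rcases hp1 with rfl | rfl <;>
      simp only [f_alt] <;> norm_num [fAltFib2] <;> decide
theorem f_changed : Claim_changed_f := by
  unfold Claim_changed_f
  refine ⟨by decide, by decide, by decide, by decide, ?_, by decide⟩
  show f_alt 1 100 = 1
  simp only [f_alt]
  norm_num [fAltFib2]
theorem f_tight : Claim_exact_f := by
  intro n p _hdom hpre hD
  rcases hpre with ⟨hn0, hp⟩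
  rcases hD with ⟨hn2, hp1, hpm1⟩
  have hdvd : ¬ (p ∣ 1) := by
    intro h
    rcases Int.isUnit_iff.mp (isUnit_of_dvd_one h) with h1 | h1 <;> omega
  interval_cases n
  · -- n = 0 : A returns 1 % p, B returns 0
    intro hcon
    have hA : f 0 p = PySem.Int.mod 1 p := by
      unfold f
      rw [show PySem.List.pyRange 0 (PySem.Int.floordiv 0 2 - 1) 1 = [] from by decide]
      rw [if_neg (by decide)]
      norm_num
    have hB : f_alt 0 p = 0 := by simp [f_alt, fAltFib2]
    rw [hA, hB] at hcon
    have := (pymod_modEq 1 p)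
    rw [hcon] at this
    exact hdvd (by simpa using this.symm.dvd)
  · -- n = 1 : A returns 2 % p, B returns 1 % p
    intro hcon
    have hA : f 1 p = PySem.Int.mod 2 p := by
      unfold f
      rw [show PySem.List.pyRange 0 (PySem.Int.floordiv 1 2 - 1) 1 = [] from by decide]
      rw [if_pos (by decide)]
      norm_num
    have hB : f_alt 1 p = PySem.Int.mod 1 p := by
      have := fB_main 1 p (by omega) hp
      simpa using this
    rw [hA, hB] at hcon
    have h21 : (2 : Int) ≡ 1 [ZMOD p] :=
      ((pymod_modEq 2 p).symm.trans (hcon ▸ pymod_modEq 1 p))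
    exact hdvd (by simpa using h21.dvd)
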